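-- pv_equiv track=rewrite | github.com/b-schneller/Neural-Machine-Translation-English-to-Spanish | neural_machine_translation/data_preprocessing.py | add_tokens_to_text
-- ===== SOURCE A (Python) =====
-- def add_tokens_to_text(source_list, target_list, bucket_dict, source_dictionary, target_dictionary):
--     number_of_samples = len(source_list)
--     source_final, target_input_final, target_output_final = [None] * number_of_samples, [None] * number_of_samples, [
--         None] * number_of_samples
--     inverse_bucket_dict = invert(bucket_dict)
--     for index, bucket_size in inverse_bucket_dict.items():
--         source_final[index] = pad_source_sentences(source_list[index], bucket_size)
--         target_input_final[index] = pad_target_input_sentences(target_list[index], bucket_size)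
--         target_output_final[index] = pad_target_output_sentences(target_list[index], bucket_size)
--     source_final_numerical = convert_words_to_numerical_id(source_final, source_dictionary)
--     target_input_final_numerical = convert_words_to_numerical_id(target_input_final, target_dictionary)
--     target_output_final_numerical = convert_words_to_numerical_id(target_output_final, target_dictionary)
--
--     return source_final_numerical, target_input_final_numerical, target_output_final_numerical
--
-- def pad_source_sentences(sentence, bucket_size):
--     sentence_length = len(sentence.split())
--     pad_length = bucket_size - sentence_length
--     return sentence + ' <PAD>' * pad_length
--
-- def pad_target_input_sentences(sentence, bucket_size):
--     sentence_length = len(sentence.split())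
--     pad_length = bucket_size - sentence_length - 1
--     return '<GO> ' + sentence + ' <PAD>' * pad_length
--
-- def pad_target_output_sentences(sentence, bucket_size):
--     sentence_length = len(sentence.split())
--     pad_length = bucket_size - sentence_length - 1
--     return sentence + ' <EOS> ' + ' <PAD>' * pad_length
--
-- def invert(d):
--     return dict((v, k) for k in d for v in d[k])
--
-- def convert_words_to_numerical_id(sentence_list, dictionary):
--     out = []
--     for sentence in sentence_list:
--         out.append([dictionary[word] if word in dictionary else dictionary['<UNK>'] for word in sentence.split()])
--
--     return out
-- ===== SOURCE B (Python) =====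
-- def _tok_id(dictionary, word):
--     return dictionary[word] if word in dictionary else dictionary['<UNK>']
--
-- def add_tokens_to_text(source_list, target_list, bucket_dict, source_dictionary, target_dictionary):
--     # one fused pass per sample over token lists: no padded strings are ever built or re-split
--     bucket_of = {}
--     for bucket, indices in bucket_dict.items():
--         for i in indices:
--             bucket_of[i] = bucket
--     n = len(source_list)
--     source_out, target_in_out, target_out_out = [None] * n, [None] * n, [None] * n
--     for i, bucket in bucket_of.items():
--         s_toks = source_list[i].split()
--         t_toks = target_list[i].split()
--         s_pad = ['<PAD>'] * (bucket - len(s_toks))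
--         t_pad = ['<PAD>'] * (bucket - len(t_toks) - 1)
--         source_out[i] = [_tok_id(source_dictionary, w) for w in s_toks + s_pad]
--         target_in_out[i] = [_tok_id(target_dictionary, w) for w in ['<GO>'] + t_toks + t_pad]
--         target_out_out[i] = [_tok_id(target_dictionary, w) for w in t_toks + ['<EOS>'] + t_pad]
--     return source_out, target_in_out, target_out_out
-- ===== Notes on version B (the rewrite author's own statement) =====
-- stated objective: alternative
-- what changed: A pads each sentence into a STRING via three string-building helpers, then a second stage re-splits every padded string and maps words to ids; B fuses the two stages into one pass per sample that works on token lists (split once, append '<PAD>'/'<GO>'/'<EOS>' tokens, map to ids in the same loop) and never builds or re-splits a padded string.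
import Mathlib
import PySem

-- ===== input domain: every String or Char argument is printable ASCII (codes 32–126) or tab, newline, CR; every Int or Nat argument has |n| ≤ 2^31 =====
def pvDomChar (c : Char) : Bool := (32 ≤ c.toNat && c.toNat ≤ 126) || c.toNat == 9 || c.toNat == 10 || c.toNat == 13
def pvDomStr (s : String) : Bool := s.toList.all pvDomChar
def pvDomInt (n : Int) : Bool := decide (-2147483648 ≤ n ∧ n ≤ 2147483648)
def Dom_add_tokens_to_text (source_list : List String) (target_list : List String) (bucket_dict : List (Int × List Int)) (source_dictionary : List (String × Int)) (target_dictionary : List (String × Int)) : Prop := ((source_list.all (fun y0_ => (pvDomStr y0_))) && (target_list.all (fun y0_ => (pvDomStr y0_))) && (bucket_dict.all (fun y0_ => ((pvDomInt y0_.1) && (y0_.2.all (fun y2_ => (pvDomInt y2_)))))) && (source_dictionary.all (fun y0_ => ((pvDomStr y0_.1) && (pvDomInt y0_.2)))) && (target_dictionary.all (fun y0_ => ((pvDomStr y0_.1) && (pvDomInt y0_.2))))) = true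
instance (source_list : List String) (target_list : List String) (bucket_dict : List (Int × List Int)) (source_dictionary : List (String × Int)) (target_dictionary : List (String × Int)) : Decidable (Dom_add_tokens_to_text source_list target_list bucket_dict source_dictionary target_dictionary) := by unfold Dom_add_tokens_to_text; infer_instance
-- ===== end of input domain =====

-- B folds A's two-stage pipeline (pad into strings via an inverted index, then re-split every padded string
-- and map words to ids) into one fused pass per sample that builds the numerical token lists directly; agreement
-- is proved on Pre_, the inputs on which the Python A returns normally (up to the '<UNK>' corner named at Pre_).

-- ===== PORT A =====
-- pad_source_sentences
def pvPadSource (sentence : String) (bucket_size : Int) : List Char :=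
  sentence.toList ++ PySem.List.pyRepeat " <PAD>".toList
    (bucket_size - ((PySem.Chars.split₀ sentence.toList).length : Int))

-- pad_target_input_sentences
def pvPadTargetInput (sentence : String) (bucket_size : Int) : List Char :=
  "<GO> ".toList ++ sentence.toList ++ PySem.List.pyRepeat " <PAD>".toList
    (bucket_size - ((PySem.Chars.split₀ sentence.toList).length : Int) - 1)

-- pad_target_output_sentences
def pvPadTargetOutput (sentence : String) (bucket_size : Int) : List Char :=
  sentence.toList ++ " <EOS> ".toList ++ PySem.List.pyRepeat " <PAD>".toList
    (bucket_size - ((PySem.Chars.split₀ sentence.toList).length : Int) - 1)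

-- invert: dict((v, k) for k in d for v in d[k])
def pvInvert (d : PySem.Dict Int (List Int)) : PySem.Dict Int Int :=
  d.keys.foldl (fun acc k => ((d.get? k).getD []).foldl (fun acc v => acc.insert v k) acc)
    PySem.Dict.empty

-- convert_words_to_numerical_id; per word: dictionary[word] if word in dictionary else dictionary['<UNK>']
-- (the '<UNK>' KeyError is outside Pre_, 0 stands in)
def pvConvert (sentence_list : List (List Char)) (dictionary : PySem.Dict (List Char) Int) :
    List (List Int) :=
  sentence_list.foldl
    (fun out sentence => out ++ [(PySem.Chars.split₀ sentence).map (fun word =>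
      if dictionary.contains word then dictionary.getD word 0
      else dictionary.getD "<UNK>".toList 0)]) []

-- the body of A's single for-loop over inverse_bucket_dict.items() (three array writes per step)
def pvFillStep (source_list target_list : List String)
    (st : List (List Char) × List (List Char) × List (List Char)) (p : Int × Int) :
    List (List Char) × List (List Char) × List (List Char) :=
  (PySem.List.pySetD st.1 p.1 (pvPadSource (PySem.List.pyGetD source_list p.1 "") p.2),
   PySem.List.pySetD st.2.1 p.1 (pvPadTargetInput (PySem.List.pyGetD target_list p.1 "") p.2),
   PySem.List.pySetD st.2.2 p.1 (pvPadTargetOutput (PySem.List.pyGetD target_list p.1 "") p.2))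

-- [None] * n: Pre_ guarantees every slot is assigned before it is read; [] stands for None
def add_tokens_to_text (source_list : List String) (target_list : List String) (bucket_dict : List (Int × List Int)) (source_dictionary : List (String × Int)) (target_dictionary : List (String × Int)) : List (List Int) × List (List Int) × List (List Int) :=
  let number_of_samples := source_list.length
  let init : List (List Char) := List.replicate number_of_samples []
  let inverse_bucket_dict := pvInvert (PySem.Dict.ofList bucket_dict)
  let filled := inverse_bucket_dict.items.foldl (pvFillStep source_list target_list)
    (init, init, init)
  let sdict := PySem.Dict.ofList (source_dictionary.map (fun q => (q.1.toList, q.2)))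
  let tdict := PySem.Dict.ofList (target_dictionary.map (fun q => (q.1.toList, q.2)))
  (pvConvert filled.1 sdict, pvConvert filled.2.1 tdict, pvConvert filled.2.2 tdict)

-- ===== PORT B =====
-- _tok_id: dictionary[word] if word in dictionary else dictionary['<UNK>'] (the KeyError is outside Pre_, 0 stands in)
def pvTokId (dictionary : PySem.Dict (List Char) Int) (word : List Char) : Int :=
  if dictionary.contains word then dictionary.getD word 0 else dictionary.getD "<UNK>".toList 0

-- for bucket, indices in bucket_dict.items(): for i in indices: bucket_of[i] = bucket
def pvBucketOf (bucket_dict : List (Int × List Int)) : PySem.Dict Int Int :=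
  (PySem.Dict.ofList bucket_dict).items.foldl
    (fun acc p => p.2.foldl (fun acc i => acc.insert i p.1) acc) PySem.Dict.empty

-- the body of B's single fused loop over bucket_of.items(): p = (i, bucket); one row of each output per step
def pvRowFill (sdict tdict : PySem.Dict (List Char) Int) (source_list target_list : List String)
    (st : List (List Int) × List (List Int) × List (List Int)) (p : Int × Int) :
    List (List Int) × List (List Int) × List (List Int) :=
  let s_toks := PySem.Chars.split₀ (PySem.List.pyGetD source_list p.1 "").toList
  let t_toks := PySem.Chars.split₀ (PySem.List.pyGetD target_list p.1 "").toList
  let s_pad := List.replicate (p.2 - s_toks.length).toNat "<PAD>".toList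
  let t_pad := List.replicate (p.2 - t_toks.length - 1).toNat "<PAD>".toList
  (PySem.List.pySetD st.1 p.1 ((s_toks ++ s_pad).map (pvTokId sdict)),
   PySem.List.pySetD st.2.1 p.1 (("<GO>".toList :: (t_toks ++ t_pad)).map (pvTokId tdict)),
   PySem.List.pySetD st.2.2 p.1 ((t_toks ++ ["<EOS>".toList] ++ t_pad).map (pvTokId tdict)))

-- [None] * n placeholders; Pre_ guarantees every slot is assigned before the result is read
def add_tokens_to_text_alt (source_list : List String) (target_list : List String) (bucket_dict : List (Int × List Int)) (source_dictionary : List (String × Int)) (target_dictionary : List (String × Int)) : List (List Int) × List (List Int) × List (List Int) :=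
  let bucket_of := pvBucketOf bucket_dict
  let sdict := PySem.Dict.ofList (source_dictionary.map (fun q => (q.1.toList, q.2)))
  let tdict := PySem.Dict.ofList (target_dictionary.map (fun q => (q.1.toList, q.2)))
  let init : List (List Int) := List.replicate source_list.length []
  bucket_of.items.foldl (pvRowFill sdict tdict source_list target_list) (init, init, init)

-- ===== PRECONDITION & SPEC =====
-- Pre_ excludes exactly the inputs where the Python A raises (an index outside [-len, len) of either list, an
-- uncovered sample index, an out-of-vocabulary token looked up with no '<UNK>' key) plus one corner on which A
-- still returns: a nonempty input whose dictionaries lack the '<UNK>' key although every occurring token happens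
-- to be in vocabulary (the closed-form over-approximation of A's KeyError condition; B returns A's value there too).
def Pre_add_tokens_to_text (source_list : List String) (target_list : List String) (bucket_dict : List (Int × List Int)) (source_dictionary : List (String × Int)) (target_dictionary : List (String × Int)) : Prop :=
  (∀ p ∈ (PySem.Dict.ofList bucket_dict).items, ∀ v ∈ p.2,
      -(source_list.length : Int) ≤ v ∧ v < (source_list.length : Int) ∧
      -(target_list.length : Int) ≤ v ∧ v < (target_list.length : Int)) ∧
  (∀ j : Nat, j < source_list.length →
      ∃ p ∈ (PySem.Dict.ofList bucket_dict).items,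
        ((j : Int) ∈ p.2 ∨ (j : Int) - (source_list.length : Int) ∈ p.2)) ∧
  (source_list = [] ∨
    ("<UNK>" ∈ source_dictionary.map Prod.fst ∧ "<UNK>" ∈ target_dictionary.map Prod.fst))
instance (source_list : List String) (target_list : List String) (bucket_dict : List (Int × List Int)) (source_dictionary : List (String × Int)) (target_dictionary : List (String × Int)) : Decidable (Pre_add_tokens_to_text source_list target_list bucket_dict source_dictionary target_dictionary) := by unfold Pre_add_tokens_to_text; infer_instance

def pvWitness_add_tokens_to_text : List String × List String × (List (Int × List Int)) × (List (String × Int)) × (List (String × Int)) :=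
  (["a b"], ["c"], [(3, [0])], [("<UNK>", 0), ("a", 1)], [("<UNK>", 5), ("c", 7)])

def Spec_add_tokens_to_text (source_list : List String) (target_list : List String) (bucket_dict : List (Int × List Int)) (source_dictionary : List (String × Int)) (target_dictionary : List (String × Int)) (out : List (List Int) × List (List Int) × List (List Int)) : Prop := out = add_tokens_to_text_alt source_list target_list bucket_dict source_dictionary target_dictionary
instance (source_list : List String) (target_list : List String) (bucket_dict : List (Int × List Int)) (source_dictionary : List (String × Int)) (target_dictionary : List (String × Int)) (out : List (List Int) × List (List Int) × List (List Int)) : Decidable (Spec_add_tokens_to_text source_list target_list bucket_dict source_dictionary target_dictionary out) := by unfold Spec_add_tokens_to_text; infer_instance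

-- ===== CLAIM (what is proved, stated in full; the proofs are below) =====
def Claim_equal_add_tokens_to_text : Prop := ∀ (source_list : List String) (target_list : List String) (bucket_dict : List (Int × List Int)) (source_dictionary : List (String × Int)) (target_dictionary : List (String × Int)), Dom_add_tokens_to_text source_list target_list bucket_dict source_dictionary target_dictionary → Pre_add_tokens_to_text source_list target_list bucket_dict source_dictionary target_dictionary → Spec_add_tokens_to_text source_list target_list bucket_dict source_dictionary target_dictionary (add_tokens_to_text source_list target_list bucket_dict source_dictionary target_dictionary)

-- ===== LEMMAS AND PROOFS =====

-- split() of a string with a space in the middle splits at that space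
lemma pv_go_acc (s : List Char) : ∀ (cur : List Char) (acc : List (List Char)),
    PySem.Chars.split₀.go s cur acc = acc.reverse ++ PySem.Chars.split₀.go s cur [] := by
  induction s with
  | nil => intro cur acc; simp only [PySem.Chars.split₀.go]; split_ifs <;> simp
  | cons c rest ih =>
    intro cur acc
    simp only [PySem.Chars.split₀.go]
    split_ifs with h1 h2
    · rw [ih [] acc]
    · rw [ih [] (cur.reverse :: acc), ih [] [cur.reverse]]; simp
    · rw [ih (c :: cur) acc]

lemma pv_go_split (xs : List Char) : ∀ (ys : List Char) (cur : List Char) (acc : List (List Char)),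
    PySem.Chars.split₀.go (xs ++ ' ' :: ys) cur acc =
      PySem.Chars.split₀.go xs cur acc ++ PySem.Chars.split₀.go ys [] [] := by
  induction xs with
  | nil =>
    intro ys cur acc
    simp only [List.nil_append, PySem.Chars.split₀.go]
    have hsp : PySem.Chars.isspace ' ' = true := by decide
    rw [if_pos hsp]
    split_ifs with h
    · rw [pv_go_acc ys [] acc]
    · rw [pv_go_acc ys [] (cur.reverse :: acc)]
  | cons c rest ih =>
    intro ys cur acc
    simp only [List.cons_append, PySem.Chars.split₀.go]
    split_ifs with h1 h2
    · exact ih ys [] acc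
    · exact ih ys [] (cur.reverse :: acc)
    · exact ih ys (c :: cur) acc

lemma pv_split₀_space (xs ys : List Char) :
    PySem.Chars.split₀ (xs ++ ' ' :: ys) = PySem.Chars.split₀ xs ++ PySem.Chars.split₀ ys := by
  simp only [PySem.Chars.split₀]; exact pv_go_split xs ys [] []

-- appending m copies of " <PAD>" appends m "<PAD>" words
lemma pv_split₀_pad (m : Nat) : ∀ (s : List Char),
    PySem.Chars.split₀ (s ++ (List.replicate m " <PAD>".toList).flatten) =
      PySem.Chars.split₀ s ++ List.replicate m "<PAD>".toList := by
  induction m with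
  | zero => intro s; simp
  | succ m ih =>
    intro s
    have h1 : s ++ (List.replicate (m + 1) " <PAD>".toList).flatten
        = s ++ ' ' :: ("<PAD>".toList ++ (List.replicate m " <PAD>".toList).flatten) := by
      simp [List.replicate_succ]
    rw [h1, pv_split₀_space, ih "<PAD>".toList]
    have h2 : PySem.Chars.split₀ "<PAD>".toList = ["<PAD>".toList] := by decide
    rw [h2]
    simp [List.replicate_succ]

lemma pv_words_src (s : String) (b : Int) :
    PySem.Chars.split₀ (pvPadSource s b) =
      PySem.Chars.split₀ s.toList ++
        List.replicate (b - ((PySem.Chars.split₀ s.toList).length : Int)).toNat "<PAD>".toList := by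
  unfold pvPadSource PySem.List.pyRepeat
  exact pv_split₀_pad _ s.toList

lemma pv_words_tin (s : String) (b : Int) :
    PySem.Chars.split₀ (pvPadTargetInput s b) =
      "<GO>".toList :: (PySem.Chars.split₀ s.toList ++
        List.replicate (b - ((PySem.Chars.split₀ s.toList).length : Int) - 1).toNat "<PAD>".toList) := by
  unfold pvPadTargetInput PySem.List.pyRepeat
  have h : "<GO> ".toList ++ (s.toList ++ (List.replicate (b - ((PySem.Chars.split₀ s.toList).length : Int) - 1).toNat " <PAD>".toList).flatten)
      = "<GO>".toList ++ ' ' :: (s.toList ++ (List.replicate (b - ((PySem.Chars.split₀ s.toList).length : Int) - 1).toNat " <PAD>".toList).flatten) := by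
    simp
  rw [List.append_assoc, h, pv_split₀_space, pv_split₀_pad]
  have h2 : PySem.Chars.split₀ "<GO>".toList = ["<GO>".toList] := by decide
  rw [h2]; rfl

lemma pv_words_tout (s : String) (b : Int) :
    PySem.Chars.split₀ (pvPadTargetOutput s b) =
      PySem.Chars.split₀ s.toList ++ "<EOS>".toList ::
        List.replicate (b - ((PySem.Chars.split₀ s.toList).length : Int) - 1).toNat "<PAD>".toList := by
  unfold pvPadTargetOutput PySem.List.pyRepeat
  have h : s.toList ++ " <EOS> ".toList ++ (List.replicate (b - ((PySem.Chars.split₀ s.toList).length : Int) - 1).toNat " <PAD>".toList).flatten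
      = s.toList ++ ' ' :: ("<EOS>".toList ++ ' ' :: (List.replicate (b - ((PySem.Chars.split₀ s.toList).length : Int) - 1).toNat " <PAD>".toList).flatten) := by
    simp
  rw [h, pv_split₀_space, pv_split₀_space]
  have h2 : PySem.Chars.split₀ "<EOS>".toList = ["<EOS>".toList] := by decide
  have h3 : PySem.Chars.split₀ ((List.replicate (b - ((PySem.Chars.split₀ s.toList).length : Int) - 1).toNat " <PAD>".toList).flatten)
      = List.replicate (b - ((PySem.Chars.split₀ s.toList).length : Int) - 1).toNat "<PAD>".toList := by
    have := pv_split₀_pad (b - ((PySem.Chars.split₀ s.toList).length : Int) - 1).toNat ([] : List Char)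
    simpa using this
  rw [h2, h3]
  simp

lemma pv_invert_eq (bucket_dict : List (Int × List Int)) :
    pvInvert (PySem.Dict.ofList bucket_dict) = pvBucketOf bucket_dict := by
  unfold pvInvert pvBucketOf
  rw [PySem.Dict.keys, List.foldl_map]
  apply PySem.List.foldl_congr_mem
  intro acc p hp
  rw [PySem.Dict.get?_of_mem_items _ hp (PySem.Dict.nodup_keys_ofList bucket_dict)]
  rfl

-- pySetD commutes with mapping a function over the list (same length, same slot)
lemma pv_pySetD_map {α β : Type} (g : α → β) (xs : List α) (i : Int) (v : α) :
    (PySem.List.pySetD xs i v).map g = PySem.List.pySetD (xs.map g) i (g v) := by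
  simp only [PySem.List.pySetD, PySem.List.pySet?, List.length_map]
  rcases h : PySem.List.pyIdx? xs.length i with _ | k <;> simp [List.map_set]

-- mapping g over an array-filling fold is the fold that writes the mapped values into the mapped array
lemma pv_map_fold {α β : Type} (g : α → β) (G : Int × Int → α) (items : List (Int × Int)) :
    ∀ init : List α,
    (items.foldl (fun arr p => PySem.List.pySetD arr p.1 (G p)) init).map g =
      items.foldl (fun arr p => PySem.List.pySetD arr p.1 (g (G p))) (init.map g) := by
  induction items with
  | nil => intro init; rfl
  | cons p rest ih =>
    intro init
    simp only [List.foldl_cons]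
    rw [ih, pv_pySetD_map]

-- A's one loop writing three arrays is three independent array-filling loops
lemma pv_fill_split (src tgt : List String) (items : List (Int × Int))
    (init : List (List Char)) :
    items.foldl (pvFillStep src tgt) (init, init, init) =
      (items.foldl (fun arr p => PySem.List.pySetD arr p.1
          (pvPadSource (PySem.List.pyGetD src p.1 "") p.2)) init,
       items.foldl (fun arr p => PySem.List.pySetD arr p.1
          (pvPadTargetInput (PySem.List.pyGetD tgt p.1 "") p.2)) init,
       items.foldl (fun arr p => PySem.List.pySetD arr p.1
          (pvPadTargetOutput (PySem.List.pyGetD tgt p.1 "") p.2)) init) := by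
  have h2 := PySem.List.foldl_prod_mk
      (fun arr (p : Int × Int) => PySem.List.pySetD arr p.1
        (pvPadTargetInput (PySem.List.pyGetD tgt p.1 "") p.2))
      (fun arr (p : Int × Int) => PySem.List.pySetD arr p.1
        (pvPadTargetOutput (PySem.List.pyGetD tgt p.1 "") p.2))
      items init init
  have h1 := PySem.List.foldl_prod_mk
      (fun arr (p : Int × Int) => PySem.List.pySetD arr p.1
        (pvPadSource (PySem.List.pyGetD src p.1 "") p.2))
      (fun (t : List (List Char) × List (List Char)) (p : Int × Int) =>
        (PySem.List.pySetD t.1 p.1 (pvPadTargetInput (PySem.List.pyGetD tgt p.1 "") p.2),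
         PySem.List.pySetD t.2 p.1 (pvPadTargetOutput (PySem.List.pyGetD tgt p.1 "") p.2)))
      items init (init, init)
  exact h1.trans (congrArg (Prod.mk _) h2)

-- B's one loop writing three arrays is three independent array-filling loops
lemma pv_row_split (sd td : PySem.Dict (List Char) Int) (src tgt : List String)
    (items : List (Int × Int)) (init : List (List Int)) :
    items.foldl (pvRowFill sd td src tgt) (init, init, init) =
      (items.foldl (fun arr p => PySem.List.pySetD arr p.1
          ((PySem.Chars.split₀ (PySem.List.pyGetD src p.1 "").toList ++
            List.replicate (p.2 -
              ((PySem.Chars.split₀ (PySem.List.pyGetD src p.1 "").toList).length : Int)).toNat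
              "<PAD>".toList).map (pvTokId sd))) init,
       items.foldl (fun arr p => PySem.List.pySetD arr p.1
          (("<GO>".toList :: (PySem.Chars.split₀ (PySem.List.pyGetD tgt p.1 "").toList ++
            List.replicate (p.2 -
              ((PySem.Chars.split₀ (PySem.List.pyGetD tgt p.1 "").toList).length : Int) - 1).toNat
              "<PAD>".toList)).map (pvTokId td))) init,
       items.foldl (fun arr p => PySem.List.pySetD arr p.1
          ((PySem.Chars.split₀ (PySem.List.pyGetD tgt p.1 "").toList ++ ["<EOS>".toList] ++
            List.replicate (p.2 -
              ((PySem.Chars.split₀ (PySem.List.pyGetD tgt p.1 "").toList).length : Int) - 1).toNat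
              "<PAD>".toList).map (pvTokId td))) init) := by
  have h2 := PySem.List.foldl_prod_mk
      (fun arr (p : Int × Int) => PySem.List.pySetD arr p.1
        ((("<GO>".toList : List Char) :: (PySem.Chars.split₀ (PySem.List.pyGetD tgt p.1 "").toList ++
          List.replicate (p.2 -
            ((PySem.Chars.split₀ (PySem.List.pyGetD tgt p.1 "").toList).length : Int) - 1).toNat
            "<PAD>".toList)).map (pvTokId td)))
      (fun arr (p : Int × Int) => PySem.List.pySetD arr p.1
        ((PySem.Chars.split₀ (PySem.List.pyGetD tgt p.1 "").toList ++ ["<EOS>".toList] ++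
          List.replicate (p.2 -
            ((PySem.Chars.split₀ (PySem.List.pyGetD tgt p.1 "").toList).length : Int) - 1).toNat
            "<PAD>".toList).map (pvTokId td)))
      items init init
  have h1 := PySem.List.foldl_prod_mk
      (fun arr (p : Int × Int) => PySem.List.pySetD arr p.1
        ((PySem.Chars.split₀ (PySem.List.pyGetD src p.1 "").toList ++
          List.replicate (p.2 -
            ((PySem.Chars.split₀ (PySem.List.pyGetD src p.1 "").toList).length : Int)).toNat
            "<PAD>".toList).map (pvTokId sd)))
      (fun (t : List (List Int) × List (List Int)) (p : Int × Int) =>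
        (PySem.List.pySetD t.1 p.1
          ((("<GO>".toList : List Char) :: (PySem.Chars.split₀ (PySem.List.pyGetD tgt p.1 "").toList ++
            List.replicate (p.2 -
              ((PySem.Chars.split₀ (PySem.List.pyGetD tgt p.1 "").toList).length : Int) - 1).toNat
              "<PAD>".toList)).map (pvTokId td)),
         PySem.List.pySetD t.2 p.1
          ((PySem.Chars.split₀ (PySem.List.pyGetD tgt p.1 "").toList ++ ["<EOS>".toList] ++
            List.replicate (p.2 -
              ((PySem.Chars.split₀ (PySem.List.pyGetD tgt p.1 "").toList).length : Int) - 1).toNat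
              "<PAD>".toList).map (pvTokId td))))
      items init (init, init)
  exact h1.trans (congrArg (Prod.mk _) h2)

-- ===== VERDICT (by name: the statement is the Claim_ definition above) =====
theorem add_tokens_to_text_spec : Claim_equal_add_tokens_to_text := by
  intro source_list target_list bucket_dict source_dictionary target_dictionary _ _
  unfold Spec_add_tokens_to_text add_tokens_to_text add_tokens_to_text_alt
  dsimp only
  rw [pv_invert_eq, pv_fill_split, pv_row_split]
  unfold pvConvert
  rw [PySem.List.foldl_append_singleton_eq_map, PySem.List.foldl_append_singleton_eq_map,
      PySem.List.foldl_append_singleton_eq_map, List.nil_append, List.nil_append, List.nil_append]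
  rw [pv_map_fold, pv_map_fold, pv_map_fold]
  simp only [Prod.mk.injEq]
  refine ⟨?_, ?_, ?_⟩
  · congr 1
    · funext arr p
      congr 1
      rw [pv_words_src]
      rfl
    · simp [List.map_replicate]
      exact Or.inr rfl
  · congr 1
    · funext arr p
      congr 1
      rw [pv_words_tin]
      rfl
    · simp [List.map_replicate]
      exact Or.inr rfl
  · congr 1
    · funext arr p
      congr 1
      rw [pv_words_tout, List.append_assoc, List.singleton_append]
      rfl
    · simp [List.map_replicate]
      exact Or.inr rfl
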